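-- pv_equiv track=rewrite | github.com/Surajjha13/governed-sql-agent | app/query_service/context_builder.py | find_join_path
-- ===== SOURCE A (Python) =====
-- from typing import Dict, List, Set
--
-- def find_join_path(graph: Dict[str, List[Dict]], start_table: str, end_table: str) -> List[Dict]:
--     """BFS to find shortest join path between two tables."""
--     if start_table == end_table:
--         return []
--
--     from collections import deque
--     queue = deque([(start_table, [])])
--     visited = {start_table}
--
--     while queue:
--         current, path = queue.popleft()
--         for edge in graph.get(current, []):
--             nxt = edge["table"]
--             # To avoid adding the target table over and over, check nxt
--             if nxt == end_table:
--                 return path + [edge]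
--             if nxt not in visited:
--                 visited.add(nxt)
--                 queue.append((nxt, path + [edge]))
--     return []
-- ===== SOURCE B (Python) =====
-- def find_join_path(graph, start_table, end_table):
--     """BFS keeping one predecessor pointer per discovered table: per dequeued node, first
--     look for a direct edge to the target (then rebuild the path once), otherwise record
--     pointers for the fresh neighbours; no partial-path lists are ever copied."""
--     if start_table == end_table:
--         return []
--     return _bfs(graph, start_table, end_table, [start_table], {})
--
--
-- def _bfs(graph, start_table, end_table, queue, pred):
--     if not queue:
--         return []
--     current, rest = queue[0], queue[1:]
--     edges = graph.get(current, [])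
--     hit = next((e for e in edges if e["table"] == end_table), None)
--     if hit is not None:
--         return _rebuild(pred, start_table, current) + [hit]
--     for edge in edges:
--         nxt = edge["table"]
--         if nxt != start_table and nxt not in pred:
--             pred[nxt] = (current, edge)
--             rest = rest + [nxt]
--     return _bfs(graph, start_table, end_table, rest, pred)
--
--
-- def _rebuild(pred, start_table, node):
--     if node == start_table:
--         return []
--     parent, edge = pred[node]
--     return _rebuild(pred, start_table, parent) + [edge]
-- ===== Notes on version B (the rewrite author's own statement) =====
-- stated objective: alternative
-- what changed: B's BFS keeps one predecessor pointer per discovered table (the dict also serving as the visited set) and, per dequeued node, first searches the adjacency for a direct edge to the target (rebuilding the path once via the pointers) and otherwise folds the adjacency into fresh pointer insertions, instead of copying the whole partial path list into the queue at every enqueue as A does.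
-- outside the precondition, e.g. on find_join_path({'a': [{'col': 'x'}]}, 'a', 'b'): A raises KeyError, B raises KeyError
import Mathlib
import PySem

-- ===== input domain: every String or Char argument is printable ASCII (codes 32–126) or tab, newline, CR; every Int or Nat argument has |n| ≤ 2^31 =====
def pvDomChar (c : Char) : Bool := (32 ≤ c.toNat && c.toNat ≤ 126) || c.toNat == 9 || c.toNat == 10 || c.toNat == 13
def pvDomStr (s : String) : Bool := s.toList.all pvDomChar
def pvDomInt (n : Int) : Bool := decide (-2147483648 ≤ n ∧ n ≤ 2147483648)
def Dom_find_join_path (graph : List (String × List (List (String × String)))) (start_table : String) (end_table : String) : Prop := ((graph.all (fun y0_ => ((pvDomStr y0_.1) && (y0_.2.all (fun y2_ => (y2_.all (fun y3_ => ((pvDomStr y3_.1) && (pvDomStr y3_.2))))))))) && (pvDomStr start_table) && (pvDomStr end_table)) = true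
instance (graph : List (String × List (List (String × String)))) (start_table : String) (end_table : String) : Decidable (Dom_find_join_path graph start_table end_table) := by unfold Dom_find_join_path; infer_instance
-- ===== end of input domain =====

-- B replaces A's per-enqueue path copying by predecessor pointers: per dequeued node it first
-- searches the adjacency for a direct edge to the target, otherwise folds the adjacency into
-- fresh pointer insertions, and rebuilds the path once at the end (alternative algorithm).


-- ===== PORT A =====
-- graph.get(current, []) (graph is a Python dict, modelled as the assoc list)
def pvGraphGet (graph : List (String × List (List (String × String)))) (k : String) :
    List (List (String × String)) :=
  PySem.Dict.getD (PySem.Dict.mk graph) k []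

-- fuel for the loops: every dequeued node (after the initial one) was enqueued when a
-- fresh node was discovered, so iterations ≤ 1 + total number of edges
def pvFuel (graph : List (String × List (List (String × String)))) : Nat :=
  graph.foldl (fun a kv => a + kv.2.length) 0 + 1

-- the 'for edge in graph.get(current, [])' body of A: either returns (inl) or yields the
-- updated queue and visited set (inr); the KeyError case (edge without "table") stops the
-- scan — it is outside Pre_
def pvScanA (end_table : String) (path : List (List (String × String))) :
    List (List (String × String)) →
    List (String × List (List (String × String))) → PySem.Set String →
    Sum (List (List (String × String)))
        (List (String × List (List (String × String))) × PySem.Set String)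
  | [], q, vis => .inr (q, vis)
  | edge :: es, q, vis =>
    match PySem.Dict.get? (PySem.Dict.mk edge) "table" with
    | none => .inr (q, vis)
    | some nxt =>
      if nxt = end_table then .inl (path ++ [edge])
      else if nxt ∉ vis then
        pvScanA end_table path es (q ++ [(nxt, path ++ [edge])]) (PySem.Set.add vis nxt)
      else pvScanA end_table path es q vis

-- the while-loop of A over the queue of (node, path) pairs
def pvLoopA (graph : List (String × List (List (String × String)))) (end_table : String) :
    Nat → List (String × List (List (String × String))) → PySem.Set String →
    List (List (String × String))
  | 0, _, _ => []
  | _ + 1, [], _ => []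
  | f + 1, (current, path) :: rest, vis =>
    match pvScanA end_table path (pvGraphGet graph current) rest vis with
    | .inl res => res
    | .inr (q, v) => pvLoopA graph end_table f q v

def find_join_path (graph : List (String × List (List (String × String)))) (start_table : String) (end_table : String) : List (List (String × String)) :=
  if start_table = end_table then []
  else pvLoopA graph end_table (pvFuel graph) [(start_table, [])] (PySem.Set.ofList [start_table])

-- ===== PORT B =====
-- B's _rebuild: walk the predecessor pointers back to start_table, parent-first
def pvRebuild (pred : PySem.Dict String (String × List (String × String)))
    (start_table : String) :
    Nat → String → List (List (String × String))
  | 0, _ => []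
  | f + 1, node =>
    if node = start_table then []
    else
      match PySem.Dict.get? pred node with
      | some pe => pvRebuild pred start_table f pe.1 ++ [pe.2]
      | none => []

-- B's 'next((e for e in edges if e["table"] == end_table), None)'
def pvHit (end_table : String) (edges : List (List (String × String))) :
    Option (List (String × String)) :=
  edges.find? (fun ed => PySem.Dict.get? (PySem.Dict.mk ed) "table" == some end_table)

-- B's second pass: fold one edge into (queue tail, pred), recording fresh neighbours
def pvExpand (start_table current : String)
    (st : List String × PySem.Dict String (String × List (String × String)))
    (edge : List (String × String)) :
    List String × PySem.Dict String (String × List (String × String)) :=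
  match PySem.Dict.get? (PySem.Dict.mk edge) "table" with
  | none => st
  | some nxt =>
    if nxt ≠ start_table ∧ st.2.contains nxt = false then
      (st.1 ++ [nxt], st.2.insert nxt (current, edge))
    else st

-- B's _bfs: recursion over the queue of bare nodes; pred doubles as the visited set
def pvBfs (graph : List (String × List (List (String × String))))
    (start_table end_table : String) :
    Nat → List String → PySem.Dict String (String × List (String × String)) →
    List (List (String × String))
  | 0, _, _ => []
  | _ + 1, [], _ => []
  | f + 1, current :: rest, pred =>
    match pvHit end_table (pvGraphGet graph current) with
    | some hit => pvRebuild pred start_table (pred.size + 1) current ++ [hit]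
    | none =>
      let st := (pvGraphGet graph current).foldl (pvExpand start_table current) (rest, pred)
      pvBfs graph start_table end_table f st.1 st.2

def find_join_path_alt (graph : List (String × List (List (String × String)))) (start_table : String) (end_table : String) : List (List (String × String)) :=
  if start_table = end_table then []
  else pvBfs graph start_table end_table (pvFuel graph) [start_table] PySem.Dict.empty

-- ===== PRECONDITION & SPEC =====
-- the "table" values of all keyed edges: every node the BFS can ever dequeue (other than
-- start_table) is such a target, so this over-approximates the scannable nodes
def pvAllTargets (graph : List (String × List (List (String × String)))) : List String :=
  graph.flatMap (fun kv => kv.2.filterMap (fun e => PySem.Dict.get? (PySem.Dict.mk e) "table"))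

-- Pre_ excludes (a) inputs on which A may raise KeyError — an edge dict without the key
-- "table" on a node the BFS could scan (start_table or a target of some keyed edge); this
-- over-approximates the raising inputs, so it also excludes some inputs on which A returns —
-- and (b) assoc lists with duplicate keys (in the graph or inside an edge), on which a Python
-- dict collapses duplicates to the last value while the assoc-list model looks up the first —
-- a representation corner, not a behaviour of A.
def Pre_find_join_path (graph : List (String × List (List (String × String)))) (start_table : String) (end_table : String) : Prop :=
  (graph.map (·.1)).Nodup ∧
  (∀ kv ∈ graph, ∀ edge ∈ kv.2, (edge.map (·.1)).Nodup) ∧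
  (start_table = end_table ∨
    ∀ kv ∈ graph, (kv.1 = start_table ∨ kv.1 ∈ pvAllTargets graph) →
      ∀ edge ∈ kv.2, "table" ∈ edge.map (·.1))
instance (graph : List (String × List (List (String × String)))) (start_table : String) (end_table : String) : Decidable (Pre_find_join_path graph start_table end_table) := by unfold Pre_find_join_path; infer_instance

def pvWitness_find_join_path : (List (String × List (List (String × String)))) × String × String :=
  ([("a", [[("table", "b"), ("on", "a.id = b.a_id")]]), ("b", [])], "a", "b")

def Spec_find_join_path (graph : List (String × List (List (String × String)))) (start_table : String) (end_table : String) (out : List (List (String × String))) : Prop := out = find_join_path_alt graph start_table end_table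
instance (graph : List (String × List (List (String × String)))) (start_table : String) (end_table : String) (out : List (List (String × String))) : Decidable (Spec_find_join_path graph start_table end_table out) := by unfold Spec_find_join_path; infer_instance

-- ===== CLAIM (what is proved, stated in full; the proofs are below) =====
def Claim_equal_find_join_path : Prop := ∀ (graph : List (String × List (List (String × String)))) (start_table : String) (end_table : String), Dom_find_join_path graph start_table end_table → Pre_find_join_path graph start_table end_table → Spec_find_join_path graph start_table end_table (find_join_path graph start_table end_table)

-- ===== LEMMAS AND PROOFS =====

-- a successful lookup in a literal dict comes from a pair of the list
theorem pv_mem_of_get?_mk {ν : Type} (l : List (String × ν)) (k : String) (v : ν)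
    (h : PySem.Dict.get? (PySem.Dict.mk l) k = some v) : (k, v) ∈ l := by
  induction l with
  | nil => simp [PySem.Dict.get?] at h
  | cons kv rest ih =>
    rw [show (kv :: rest) = ((kv.1, kv.2) :: rest) by simp, PySem.Dict.get?_mk_cons] at h
    by_cases hk : kv.1 = k
    · simp [hk] at h; subst hk; subst h; exact List.mem_cons_self
    · simp [show (kv.1 == k) = false by simpa using hk] at h
      exact List.mem_cons_of_mem _ (ih h)

-- a key present in the pair list is found by the literal dict
theorem pv_get?_mk_isSome_of_mem {ν : Type} (l : List (String × ν)) (k : String)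
    (h : k ∈ l.map (·.1)) : (PySem.Dict.get? (PySem.Dict.mk l) k).isSome = true := by
  induction l with
  | nil => simp at h
  | cons kv rest ih =>
    rw [show (kv :: rest) = ((kv.1, kv.2) :: rest) by simp, PySem.Dict.get?_mk_cons]
    by_cases hk : kv.1 = k
    · simp [hk]
    · simp [show (kv.1 == k) = false by simpa using hk]
      simp at h
      rcases h with h | h
      · exact absurd h.symm hk
      · exact ih (by simpa using h)

-- membership of an adjacency list element in the graph
theorem pv_graphGet_mem (graph : List (String × List (List (String × String)))) (k : String)
    (ed : List (String × String)) (h : ed ∈ pvGraphGet graph k) :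
    ∃ kv ∈ graph, kv.1 = k ∧ ed ∈ kv.2 := by
  unfold pvGraphGet at h
  rw [PySem.Dict.getD_eq_get?_getD] at h
  cases hg : PySem.Dict.get? (PySem.Dict.mk graph) k with
  | none => rw [hg] at h; simp at h
  | some v =>
    rw [hg] at h; simp at h
    exact ⟨(k, v), pv_mem_of_get?_mk graph k v hg, rfl, h⟩

-- 'pvChain s pred n p ns': following pred back from n reaches s, collecting exactly the
-- edge list p (in travel order); ns lists the intermediate nodes (n first), without repeats
inductive pvChain (s : String) (pred : PySem.Dict String (String × List (String × String))) :
    String → List (List (String × String)) → List String → Prop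
  | base : pvChain s pred s [] []
  | step {n parent e p ns} :
      PySem.Dict.get? pred n = some (parent, e) → n ≠ s → n ∉ ns →
      pvChain s pred parent p ns → pvChain s pred n (p ++ [e]) (n :: ns)

theorem pvChain_mem (s : String) (pred : PySem.Dict String (String × List (String × String)))
    {n p ns} (h : pvChain s pred n p ns) :
    ∀ x ∈ ns, (PySem.Dict.get? pred x).isSome := by
  induction h with
  | base => simp
  | step hget hns hnot _ ih =>
    intro x hx
    rcases List.mem_cons.mp hx with rfl | hx
    · simp [hget]
    · exact ih x hx

theorem pvChain_nodup (s : String) (pred : PySem.Dict String (String × List (String × String)))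
    {n p ns} (h : pvChain s pred n p ns) : ns.Nodup := by
  induction h with
  | base => exact List.nodup_nil
  | step _ _ hnot _ ih => exact List.nodup_cons.mpr ⟨hnot, ih⟩

-- inserting a fresh key preserves every chain
theorem pvChain_mono (s : String) (pred : PySem.Dict String (String × List (String × String)))
    {m : String} {v : String × List (String × String)}
    (hm : PySem.Dict.get? pred m = none) {n p ns} (h : pvChain s pred n p ns) :
    pvChain s (pred.insert m v) n p ns := by
  induction h with
  | base => exact pvChain.base
  | step hget hns hnot _ ih =>
    refine pvChain.step ?_ hns hnot ih
    rw [PySem.Dict.get?_insert_of_ne]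
    · exact hget
    · intro heq; rw [heq] at hget; rw [hget] at hm; cases hm

-- the chain nodes are keys of pred, so there are at most pred.size of them
theorem pvChain_len_le (s : String) (pred : PySem.Dict String (String × List (String × String)))
    {n p ns} (h : pvChain s pred n p ns) : ns.length ≤ pred.size := by
  have hsub : ns ⊆ pred.keys := by
    intro x hx
    have h0 := pvChain_mem s pred h x hx
    by_contra hxk
    rw [(PySem.Dict.get?_eq_none_iff_not_mem_keys pred x).mpr hxk] at h0
    simp at h0
  have hnd := pvChain_nodup s pred h
  calc ns.length = ns.toFinset.card := (List.toFinset_card_of_nodup hnd).symm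
    _ ≤ pred.keys.toFinset.card := Finset.card_le_card (fun x hx => by
        simp only [List.mem_toFinset] at *; exact hsub (by simpa using hx))
    _ ≤ pred.keys.length := pred.keys.toFinset_card_le
    _ = pred.size := by simp [PySem.Dict.keys, PySem.Dict.size]

-- pvRebuild reads a chain back correctly
theorem pvRebuild_of_chain (s : String)
    (pred : PySem.Dict String (String × List (String × String)))
    {n p ns} (h : pvChain s pred n p ns) :
    ∀ fuel, ns.length + 1 ≤ fuel → pvRebuild pred s fuel n = p := by
  induction h with
  | base =>
    intro fuel hf
    match fuel, hf with
    | f + 1, _ => simp [pvRebuild]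
  | @step n parent e p ns hget hns hnot _ ih =>
    intro fuel hf
    match fuel, hf with
    | f + 1, hf =>
      have hfl : ns.length + 1 ≤ f := by simpa using Nat.lt_succ_iff.mp hf
      simp only [pvRebuild, if_neg hns, hget]
      rw [ih f hfl]

-- the loop invariant tying A's state (queue of (node, path), visited set) to B's
-- (queue of nodes, pred map): queues aligned, vis = {start} ∪ keys pred, every queued
-- path realised by a pointer chain, every queued node scannable (start or a target)
def pvInv (graph : List (String × List (List (String × String)))) (s : String)
    (vis : PySem.Set String)
    (pred : PySem.Dict String (String × List (String × String)))
    (qA : List (String × List (List (String × String)))) (qB : List String) : Prop :=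
  qB = qA.map Prod.fst ∧
  (∀ n : String, n ∈ vis ↔ (n = s ∨ (PySem.Dict.get? pred n).isSome)) ∧
  (∀ x ∈ qA, (∃ ns, pvChain s pred x.1 x.2 ns) ∧ (x.1 = s ∨ x.1 ∈ pvAllTargets graph))

-- one node's adjacency: A's interleaved scan vs B's hit-search + pointer fold
theorem pvScan_rel (graph : List (String × List (List (String × String))))
    (s e current : String) (path : List (List (String × String))) :
    ∀ (edges : List (List (String × String)))
      (qA : List (String × List (List (String × String)))) (qB : List String)
      (vis : PySem.Set String)
      (pred : PySem.Dict String (String × List (String × String)))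
      (ns0 : List String),
      (∀ ed ∈ edges, (PySem.Dict.get? (PySem.Dict.mk ed) "table").isSome = true) →
      (∀ ed ∈ edges, ∀ v, PySem.Dict.get? (PySem.Dict.mk ed) "table" = some v →
        v ∈ pvAllTargets graph) →
      pvChain s pred current path ns0 →
      pvInv graph s vis pred qA qB →
      (∀ hit, pvHit e edges = some hit →
        pvScanA e path edges qA vis = Sum.inl (path ++ [hit])) ∧
      (pvHit e edges = none →
        ∃ qA' vis', pvScanA e path edges qA vis = Sum.inr (qA', vis') ∧
          pvInv graph s vis' (edges.foldl (pvExpand s current) (qB, pred)).2 qA'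
            (edges.foldl (pvExpand s current) (qB, pred)).1) := by
  intro edges
  induction edges with
  | nil =>
    intro qA qB vis pred ns0 _ _ _ hinv
    refine ⟨?_, ?_⟩
    · intro hit hh; simp [pvHit] at hh
    · intro _; exact ⟨qA, vis, rfl, by simpa using hinv⟩
  | cons ed es ih =>
    intro qA qB vis pred ns0 htab htgt hc hinv
    obtain ⟨hq, hvis, hchains⟩ := hinv
    have hkey := htab ed List.mem_cons_self
    cases hget : PySem.Dict.get? (PySem.Dict.mk ed) "table" with
    | none => rw [hget] at hkey; simp at hkey
    | some nxt =>
      by_cases hend : nxt = e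
      · -- the head edge reaches the target: both sides return here
        have hh0 : pvHit e (ed :: es) = some ed := by
          unfold pvHit; rw [List.find?_cons_of_pos (by simp [hget, hend])]
        refine ⟨?_, ?_⟩
        · intro hit hh
          rw [hh0] at hh
          cases hh
          simp [pvScanA, hget, hend]
        · intro hh; rw [hh0] at hh; cases hh
      · -- the head edge does not reach the target
        have hfind : pvHit e (ed :: es) = pvHit e es := by
          unfold pvHit; rw [List.find?_cons_of_neg (by simp [hget, hend])]
        have htab' := fun x hx => htab x (List.mem_cons_of_mem _ hx)
        have htgt' := fun x hx => htgt x (List.mem_cons_of_mem _ hx)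
        by_cases hmem : nxt ∈ vis
        · -- already visited: A skips, B's expand is the identity
          have hB : ¬ (nxt ≠ s ∧ PySem.Dict.contains pred nxt = false) := by
            rcases (hvis nxt).mp hmem with h1 | h2
            · intro h; exact h.1 h1
            · intro h
              have h3 := h.2
              rw [PySem.Dict.contains_eq_isSome_get?] at h3
              simp [h2] at h3
          have hstep : pvScanA e path (ed :: es) qA vis = pvScanA e path es qA vis := by
            simp [pvScanA, hget, hend, hmem]
          have hexp : pvExpand s current (qB, pred) ed = (qB, pred) := by
            simp only [pvExpand, hget]
            rw [if_neg hB]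
          rw [hstep, hfind, List.foldl_cons, hexp]
          exact ih qA qB vis pred ns0 htab' htgt' hc ⟨hq, hvis, hchains⟩
        · -- fresh node: A enqueues (nxt, path++[ed]); B records the pointer
          have hfresh : PySem.Dict.get? pred nxt = none := by
            cases hcase : PySem.Dict.get? pred nxt with
            | none => rfl
            | some v => exact absurd ((hvis nxt).mpr (Or.inr (by simp [hcase]))) hmem
          have hns : nxt ≠ s := fun hh => hmem ((hvis nxt).mpr (Or.inl hh))
          have hB : nxt ≠ s ∧ PySem.Dict.contains pred nxt = false := by
            refine ⟨hns, ?_⟩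
            rw [PySem.Dict.contains_eq_isSome_get?, hfresh]; rfl
          have hstep : pvScanA e path (ed :: es) qA vis =
              pvScanA e path es (qA ++ [(nxt, path ++ [ed])]) (PySem.Set.add vis nxt) := by
            simp [pvScanA, hget, hend, hmem]
          have hexp : pvExpand s current (qB, pred) ed =
              (qB ++ [nxt], pred.insert nxt (current, ed)) := by
            simp only [pvExpand, hget]
            rw [if_pos hB]
          rw [hstep, hfind, List.foldl_cons, hexp]
          refine ih (qA ++ [(nxt, path ++ [ed])]) (qB ++ [nxt]) (PySem.Set.add vis nxt)
            (pred.insert nxt (current, ed)) ns0 htab' htgt'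
            (pvChain_mono s pred hfresh hc) ?_
          refine ⟨by simp [hq], ?_, ?_⟩
          · intro m
            rw [PySem.Set.mem_add, hvis m, PySem.Dict.get?_insert]
            by_cases hm : m = nxt <;> simp [hm]
          · intro x hx
            rcases List.mem_append.mp hx with hx | hx
            · obtain ⟨⟨ns, hns'⟩, hsc⟩ := hchains x hx
              exact ⟨⟨ns, pvChain_mono s pred hfresh hns'⟩, hsc⟩
            · simp only [List.mem_singleton] at hx
              subst hx
              refine ⟨⟨nxt :: ns0, ?_⟩, Or.inr (htgt ed List.mem_cons_self nxt hget)⟩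
              refine pvChain.step (by rw [PySem.Dict.get?_insert_self]) hns ?_
                (pvChain_mono s pred hfresh hc)
              intro hmemns
              have := pvChain_mem s pred hc nxt hmemns
              rw [hfresh] at this; cases this

theorem pvLoop_eq (graph : List (String × List (List (String × String)))) (s e : String)
    (hkeyed : ∀ kv ∈ graph, (kv.1 = s ∨ kv.1 ∈ pvAllTargets graph) →
      ∀ edge ∈ kv.2, "table" ∈ edge.map (·.1)) :
    ∀ (f : Nat) (qA : List (String × List (List (String × String)))) (qB : List String)
      (vis : PySem.Set String)
      (pred : PySem.Dict String (String × List (String × String))),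
      pvInv graph s vis pred qA qB →
      pvLoopA graph e f qA vis = pvBfs graph s e f qB pred := by
  intro f
  induction f with
  | zero => intro qA qB vis pred _; rfl
  | succ f ih =>
    intro qA qB vis pred hinv
    obtain ⟨hq, hvis, hchains⟩ := hinv
    cases qA with
    | nil => subst hq; rfl
    | cons hd rest =>
      obtain ⟨current, path⟩ := hd
      subst hq
      obtain ⟨⟨ns0, hc⟩, hscan⟩ := hchains (current, path) List.mem_cons_self
      have htab : ∀ ed ∈ pvGraphGet graph current,
          (PySem.Dict.get? (PySem.Dict.mk ed) "table").isSome = true := by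
        intro ed hed
        obtain ⟨kv, hkv, hk1, hed2⟩ := pv_graphGet_mem graph current ed hed
        exact pv_get?_mk_isSome_of_mem ed "table" (hkeyed kv hkv (hk1 ▸ hscan) ed hed2)
      have htgt : ∀ ed ∈ pvGraphGet graph current, ∀ v,
          PySem.Dict.get? (PySem.Dict.mk ed) "table" = some v → v ∈ pvAllTargets graph := by
        intro ed hed v hv
        obtain ⟨kv, hkv, _, hed2⟩ := pv_graphGet_mem graph current ed hed
        unfold pvAllTargets
        simp only [List.mem_flatMap, List.mem_filterMap]
        exact ⟨kv, hkv, ed, hed2, hv⟩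
      have hrel := pvScan_rel graph s e current path (pvGraphGet graph current) rest
        (rest.map Prod.fst) vis pred ns0 htab htgt hc
        ⟨rfl, hvis, fun x hx => hchains x (List.mem_cons_of_mem _ hx)⟩
      cases hh : pvHit e (pvGraphGet graph current) with
      | some hit =>
        simp only [pvLoopA, pvBfs, List.map_cons, hh, hrel.1 hit hh]
        rw [pvRebuild_of_chain s pred hc (pred.size + 1)
          (by have := pvChain_len_le s pred hc; omega)]
      | none =>
        obtain ⟨qA', vis', hA, hinv'⟩ := hrel.2 hh
        simp only [pvLoopA, pvBfs, List.map_cons, hh, hA]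
        exact ih qA' _ vis' _ hinv'

-- ===== VERDICT (by name: the statement is the Claim_ definition above) =====
theorem find_join_path_spec : Claim_equal_find_join_path := by
  intro graph s e _ hpre
  unfold Spec_find_join_path find_join_path find_join_path_alt
  by_cases hse : s = e
  · simp [hse]
  · simp only [if_neg hse]
    have hkeyed := hpre.2.2.resolve_left hse
    refine pvLoop_eq graph s e hkeyed (pvFuel graph) [(s, [])] [s] (PySem.Set.ofList [s])
      PySem.Dict.empty ⟨rfl, ?_, ?_⟩
    · intro n; simp [PySem.Set.ofList, PySem.Set.add, PySem.Dict.get?_empty]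
    · intro x hx
      simp only [List.mem_singleton] at hx
      subst hx
      exact ⟨⟨[], pvChain.base⟩, Or.inl rfl⟩
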